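-- pv_equiv track=rewrite | github.com/a1029/algorithm | baekjoon/string/1013.py | solution
-- ===== SOURCE A (Python) =====
-- def solution(strs):
--     answer = 0
--     for str in strs:
--         stack = []
--         for i in range(len(str)-1, -1, -1):
--             stack.append(str[i])
--             if len(stack) > 1:
--                 if str[i] == "A":
--                     if stack[-1] == "A" and "A" not in stack[:-1]:
--                         stack.clear()
--                 else:
--                     if stack[-1] == "A":
--                         stack.clear()
--         if not stack:
--             answer += 1
--     return answer
-- ===== SOURCE B (Python) =====
-- def solution(strs):
--     def good(s):
--         # accepted strings are exactly those of the form ('A' non-A+)*: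
--         # empty, or starting with 'A', not ending with 'A', with no "AA" inside
--         return s == "" or (
--             s[0] == "A"
--             and s[-1] != "A"
--             and not any(a == "A" and b == "A" for a, b in zip(s, s[1:]))
--         )
--     return sum(good(s) for s in strs)
-- ===== Notes on version B (the rewrite author's own statement) =====
-- stated objective: faster
-- what changed: Replaces A's reverse-scan stack simulation (with a per-push slice copy and membership rescan) by a closed-form forward characterization of the accepted language ('A' nonA+)*: empty, or starts with 'A', does not end with 'A', and has no adjacent "AA" pair.
import Mathlib
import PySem

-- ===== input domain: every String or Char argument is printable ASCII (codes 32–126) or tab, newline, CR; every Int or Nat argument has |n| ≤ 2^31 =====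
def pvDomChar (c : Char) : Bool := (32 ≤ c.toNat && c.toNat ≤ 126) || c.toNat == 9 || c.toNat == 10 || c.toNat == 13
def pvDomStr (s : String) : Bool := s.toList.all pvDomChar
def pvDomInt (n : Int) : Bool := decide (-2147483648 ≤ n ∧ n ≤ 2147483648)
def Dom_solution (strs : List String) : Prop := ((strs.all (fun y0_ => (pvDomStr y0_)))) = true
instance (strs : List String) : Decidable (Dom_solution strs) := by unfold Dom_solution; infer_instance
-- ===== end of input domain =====

-- B drops A's reverse-scan stack simulation entirely and counts via a closed-form
-- characterization of the accepted strings: empty, or starts with 'A', does not end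
-- with 'A', and contains no adjacent "AA" — O(m) per string instead of O(m^2).

-- ===== PORT A =====
-- A's inner loop visits str[len-1], …, str[0] (the characters in reverse order);
-- each step appends the character and may clear the stack.
def solAStep (stack : List Char) (c : Char) : List Char :=
  let stack' := stack ++ [c]                               -- stack.append(str[i])
  if stack'.length > 1 then
    if c == 'A' then
      -- stack[-1] is the just-appended c; stack[:-1] is the old stack (dropLast)
      if stack'.getLast? == some 'A' && !(stack'.dropLast.contains 'A') then [] else stack'
    else
      if stack'.getLast? == some 'A' then [] else stack'
  else stack'

def solution (strs : List String) : Int :=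
  strs.foldl (fun answer s =>
    let stack := s.toList.reverse.foldl solAStep []
    if stack.isEmpty then answer + 1 else answer) 0

-- ===== PORT B =====
-- any(a == "A" and b == "A" for a, b in zip(s, s[1:]))
def hasAAzip (l : List Char) : Bool :=
  (l.zip (l.drop 1)).any (fun p => p.1 == 'A' && p.2 == 'A')

-- s == "" or (s[0] == "A" and s[-1] != "A" and not any(...))
def goodB (s : String) : Bool :=
  (s.toList == []) ||
    ((PySem.List.pyGet? s.toList 0 == some 'A') &&
     !(PySem.List.pyGet? s.toList (-1) == some 'A') &&
     !hasAAzip s.toList)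

def solution_alt (strs : List String) : Int :=
  strs.foldl (fun acc s => acc + (if goodB s then 1 else 0)) 0   -- sum(good(s) for s in strs)

-- ===== PRECONDITION & SPEC =====
def Spec_solution (strs : List String) (out : Int) : Prop := out = solution_alt strs
instance (strs : List String) (out : Int) : Decidable (Spec_solution strs out) := by unfold Spec_solution; infer_instance

-- ===== CLAIM (what is proved, stated in full; the proofs are below) =====
def Claim_equal_solution : Prop := ∀ (strs : List String), Dom_solution strs → Spec_solution strs (solution strs)

-- ===== LEMMAS AND PROOFS =====

-- the two-state acceptance automaton of A's stack machine, read over the reversed string: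
-- PQ true cs : cs matches ([^A]+ 'A')* ; PQ false cs : cs matches [^A]* 'A' ([^A]+ 'A')*
def PQ : Bool → List Char → Bool
  | true, [] => true
  | true, c :: cs => (c != 'A') && PQ false cs
  | false, [] => false
  | false, c :: cs => if c == 'A' then PQ true cs else PQ false cs

theorem concat_len_gt (stack : List Char) (c : Char) (h : stack ≠ []) :
    (stack ++ [c]).length > 1 := by
  rcases stack with _ | ⟨d, ds⟩
  · exact absurd rfl h
  · simp only [List.cons_append, List.length_cons, List.length_append, List.length_nil]; omega

-- a stack that contains an 'A' never clears again
theorem dead_step (stack : List Char) (c : Char) (h : stack ≠ []) (hA : stack.contains 'A' = true) :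
    solAStep stack c = stack ++ [c] := by
  simp only [solAStep, List.getLast?_concat, List.dropLast_concat]
  have hlen := concat_len_gt stack c h
  by_cases hc : c = 'A' <;> simp_all

theorem dead_fold (cs : List Char) : ∀ (stack : List Char), stack ≠ [] →
    stack.contains 'A' = true → (cs.foldl solAStep stack).isEmpty = false := by
  induction cs with
  | nil => intro stack h hA; rcases stack with _ | _ <;> simp_all
  | cons c cs ih =>
    intro stack h hA
    rw [List.foldl_cons, dead_step stack c h hA]
    exact ih _ (by simp) (by simp; exact Or.inl (by simpa using hA))

-- acceptance of A's machine = PQ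
theorem fold_PQ (cs : List Char) :
    ((cs.foldl solAStep []).isEmpty = PQ true cs)
    ∧ (∀ (stack : List Char), stack ≠ [] → stack.contains 'A' = false →
        (cs.foldl solAStep stack).isEmpty = PQ false cs) := by
  induction cs with
  | nil =>
    refine ⟨rfl, ?_⟩
    intro stack h _; rcases stack with _ | _ <;> simp_all [PQ]
  | cons c cs ih =>
    constructor
    · -- start from the empty stack: push c (no clear possible at length 1)
      have hstep : solAStep [] c = [c] := by simp [solAStep]
      rw [List.foldl_cons, hstep]
      by_cases hc : c = 'A'
      · subst hc
        rw [dead_fold cs [ 'A' ] (by simp) (by simp)]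
        simp [PQ]
      · rw [ih.2 [c] (by simp) (by simp; exact fun hh => hc hh.symm)]
        simp [PQ, hc]
    · intro stack h hA
      rw [List.foldl_cons]
      by_cases hc : c = 'A'
      · subst hc
        have hstep : solAStep stack 'A' = [] := by
          simp only [solAStep, List.getLast?_concat, List.dropLast_concat]
          have hlen := concat_len_gt stack 'A' h
          simp_all
        rw [hstep, ih.1]; simp [PQ]
      · have hstep : solAStep stack c = stack ++ [c] := by
          simp only [solAStep, List.getLast?_concat, List.dropLast_concat]
          have hlen := concat_len_gt stack c h
          simp_all
        rw [hstep, ih.2 (stack ++ [c]) (by simp)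
          (by simp; exact ⟨by simpa using hA, fun hh => hc hh.symm⟩)]
        simp [PQ, hc]

-- recursive form of the adjacent-"AA" test
def hasAA : List Char → Bool
  | a :: b :: t => (a == 'A' && b == 'A') || hasAA (b :: t)
  | _ => false

theorem hasAAzip_eq : ∀ (l : List Char), hasAAzip l = hasAA l
  | [] => rfl
  | [_] => rfl
  | a :: b :: t => by
    have ih := hasAAzip_eq (b :: t)
    simp only [hasAAzip, List.drop_succ_cons, List.drop_zero, List.zip_cons_cons,
      List.any_cons] at ih ⊢
    rw [hasAA, ih]

theorem hasAA_cons (c : Char) (cs : List Char) :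
    hasAA (c :: cs) = ((c == 'A' && cs.head? == some 'A') || hasAA cs) := by
  rcases cs with _ | ⟨d, t⟩ <;> simp [hasAA]

theorem hasAA_concat (l : List Char) (c : Char) :
    hasAA (l ++ [c]) = (hasAA l || (l.getLast? == some 'A' && c == 'A')) := by
  induction l with
  | nil => simp [hasAA]
  | cons a t ih =>
    rw [List.cons_append, hasAA_cons, ih, hasAA_cons]
    rcases t with _ | ⟨b, t⟩ <;> simp [hasAA, Bool.or_comm, Bool.or_left_comm, Bool.or_assoc, Bool.and_comm, Bool.and_left_comm, Bool.and_assoc]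

theorem hasAA_reverse (l : List Char) : hasAA l.reverse = hasAA l := by
  induction l with
  | nil => rfl
  | cons c cs ih =>
    rw [List.reverse_cons, hasAA_concat, ih, hasAA_cons, List.getLast?_reverse]
    rcases h : cs.head? <;> simp [Bool.or_comm, Bool.or_left_comm, Bool.or_assoc, Bool.and_comm, Bool.and_left_comm, Bool.and_assoc]

-- closed-form characterization of PQ
theorem PQ_char (cs : List Char) :
    (PQ true cs = (cs.isEmpty || ((cs.head? != some 'A') && (cs.getLast? == some 'A') && !hasAA cs)))
    ∧ (PQ false cs = (!cs.isEmpty && (cs.getLast? == some 'A') && !hasAA cs)) := by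
  induction cs with
  | nil => exact ⟨rfl, rfl⟩
  | cons c cs ih =>
    constructor
    · show ((c != 'A') && PQ false cs) = _
      rw [ih.2, hasAA_cons]
      rcases cs with _ | ⟨d, t⟩
      · simp
      · by_cases hc : c = 'A' <;> by_cases hd : d = 'A' <;>
          rcases hq : hasAA (d :: t) <;> rcases hg : ((d :: t).getLast? == some 'A') <;>
          simp_all [bne, Bool.or_comm, Bool.or_left_comm, Bool.or_assoc, Bool.and_comm, Bool.and_left_comm, Bool.and_assoc]
    · show (if c == 'A' then PQ true cs else PQ false cs) = _
      rw [ih.1, ih.2, hasAA_cons]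
      rcases cs with _ | ⟨d, t⟩
      · by_cases hc : c = 'A' <;> simp_all [PQ, hasAA]
      · by_cases hc : c = 'A' <;> by_cases hd : d = 'A' <;>
          rcases hq : hasAA (d :: t) <;> rcases hg : ((d :: t).getLast? == some 'A') <;>
          simp_all [bne, Bool.or_comm, Bool.or_left_comm, Bool.or_assoc, Bool.and_comm, Bool.and_left_comm, Bool.and_assoc]
-- s[-1] on a nonempty string is its last character
theorem pyGet_neg_one (c : Char) (cs : List Char) :
    PySem.List.pyGet? (c :: cs) (-1) = (c :: cs).getLast? := by
  simp [PySem.List.pyGet?, PySem.List.pyIdx?, List.getLast?_eq_getElem?]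

-- per string: A's stack empties iff B's closed-form test accepts
theorem per_string (s : String) :
    (s.toList.reverse.foldl solAStep []).isEmpty = goodB s := by
  rw [(fold_PQ s.toList.reverse).1, (PQ_char s.toList.reverse).1]
  unfold goodB
  rw [hasAAzip_eq, List.head?_reverse, List.getLast?_reverse, hasAA_reverse]
  rcases h : s.toList with _ | ⟨c, cs⟩
  · simp
  · rw [pyGet_neg_one]
    simp only [List.isEmpty_reverse, PySem.List.pyGet?_zero_cons]
    rcases hl : (c :: cs).getLast? <;>
      simp [bne, Option.some.injEq, Bool.or_comm, Bool.or_left_comm, Bool.or_assoc, Bool.and_comm, Bool.and_left_comm, Bool.and_assoc]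

-- ===== VERDICT (by name: the statement is the Claim_ definition above) =====
theorem solution_spec : Claim_equal_solution := by
  intro strs _
  unfold Spec_solution solution solution_alt
  suffices h : ∀ (l : List String) (acc : Int),
      l.foldl (fun answer s =>
        let stack := s.toList.reverse.foldl solAStep []
        if stack.isEmpty then answer + 1 else answer) acc
      = l.foldl (fun acc s => acc + (if goodB s then 1 else 0)) acc from h strs 0
  intro l
  induction l with
  | nil => intro acc; rfl
  | cons s l ih =>
    intro acc
    rw [List.foldl_cons, List.foldl_cons, ih]
    congr 1
    simp only [per_string]
    by_cases h : goodB s <;> simp [h]
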